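-- pv_equiv track=rewrite | github.com/karenli8765/6.101-recipes | lab.py | ingredient_mixes
-- ===== SOURCE A (Python) =====
-- def make_grocery_list(flat_recipes):
--     """
--     Given a list of flat_recipe dictionaries that map food items to quantities,
--     return a new overall 'grocery list' dictionary that maps each ingredient name
--     to the sum of its quantities across the given flat recipes.
--
--     For example,
--         make_grocery_list([{'milk':1, 'chocolate':1}, {'sugar':1, 'milk':2}])
--     should return:
--         {'milk':3, 'chocolate': 1, 'sugar': 1}
--     """
--     grocery_list = {}
--     for flat_recipe in flat_recipes:
--         for ingredient in flat_recipe: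
--             if ingredient in grocery_list:
--                 grocery_list[ingredient] += flat_recipe[ingredient]
--             else:
--                 grocery_list[ingredient] = flat_recipe[ingredient]
--     return grocery_list
--
-- def ingredient_mixes(flat_recipes):
--     """
--     Given a list of lists of dictionaries, where each inner list represents all
--     the flat recipes make a certain ingredient as part of a recipe, compute all
--     combinations of the flat recipes.
--     """
--     if len(flat_recipes) == 1:
--         return [ingredient for ingredient in flat_recipes[0]]
--     all_mixes = []
--     for ingredient in flat_recipes[0]:
--         for other_mixes in ingredient_mixes(flat_recipes[1:]):
--             grocery_list = make_grocery_list([ingredient, other_mixes])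
--             all_mixes.append(grocery_list)
--     return all_mixes
-- ===== SOURCE B (Python) =====
-- def _merge(d1, d2):
--     out = dict(d1)
--     for k, v in d2.items():
--         out[k] = out.get(k, 0) + v
--     return out
--
-- def ingredient_mixes(flat_recipes):
--     mixes = list(flat_recipes[-1])
--     for level in reversed(flat_recipes[:-1]):
--         mixes = [_merge(ing, m) for ing in level for m in mixes]
--     return mixes
-- ===== Notes on version B (the rewrite author's own statement) =====
-- stated objective: faster
-- what changed: B replaces A's recursion, which recomputes ingredient_mixes(flat_recipes[1:]) once per ingredient at every level, with a single right-to-left fold that builds each suffix's mixes exactly once and extends them by one level per pass; intended as faster (a timing run measured about 1.7-1.9x at the largest size both finished, not the >=1.5x-at-top confirmation).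
import Mathlib
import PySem

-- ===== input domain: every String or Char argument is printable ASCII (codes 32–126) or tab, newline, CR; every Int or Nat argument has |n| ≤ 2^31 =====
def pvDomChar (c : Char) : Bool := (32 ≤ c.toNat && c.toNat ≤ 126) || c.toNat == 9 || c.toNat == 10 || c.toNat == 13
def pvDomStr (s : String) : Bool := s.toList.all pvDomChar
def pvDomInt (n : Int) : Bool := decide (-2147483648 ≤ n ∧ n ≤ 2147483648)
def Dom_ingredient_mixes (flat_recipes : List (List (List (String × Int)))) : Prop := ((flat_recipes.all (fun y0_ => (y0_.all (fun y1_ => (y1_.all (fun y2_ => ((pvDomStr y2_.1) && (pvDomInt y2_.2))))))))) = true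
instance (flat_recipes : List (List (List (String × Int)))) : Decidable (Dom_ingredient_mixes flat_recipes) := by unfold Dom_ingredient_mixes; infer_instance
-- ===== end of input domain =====

-- B hoists the recursive suffix computation out of A's inner loop: one right-to-left pass
-- computing each suffix's mixes exactly once (A recomputes the whole suffix product once per
-- ingredient at every level); intended as faster — a timing run measured about 1.7-1.9x
-- at the largest size both finished, not a confirmed speed-up.

-- ===== PORT A =====
-- make_grocery_list: dicts are assoc lists; the loop is a Dict fold (contains/insert/getD are PySem.Dict)
def make_grocery_list (flat_recipes : List (List (String × Int))) : List (String × Int) :=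
  (flat_recipes.foldl (fun g fr =>
      -- 'for ingredient in flat_recipe' iterates the dict's keys in order
      fr.foldl (fun g kv =>
        let ingredient := kv.1
        if g.contains ingredient then
          g.insert ingredient (g.getD ingredient 0 + (PySem.Dict.mk fr).getD ingredient 0)
        else
          g.insert ingredient ((PySem.Dict.mk fr).getD ingredient 0)) g)
    PySem.Dict.empty).items

def ingredient_mixes (flat_recipes : List (List (List (String × Int)))) : List (List (String × Int)) :=
  match flat_recipes with
  | [] => []          -- Python raises IndexError here (flat_recipes[0]); excluded by Pre_
  | [level] => level  -- len == 1: '[ingredient for ingredient in flat_recipes[0]]'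
  | level :: rest =>
      level.foldl (fun all_mixes ingredient =>
        (ingredient_mixes rest).foldl (fun all_mixes other_mixes =>
          all_mixes ++ [make_grocery_list [ingredient, other_mixes]]) all_mixes) []

-- ===== PORT B =====
-- _merge: out = dict(d1); out[k] = out.get(k, 0) + v for (k, v) in d2
def pv_merge (d1 d2 : List (String × Int)) : List (String × Int) :=
  (d2.foldl (fun o kv => o.insert kv.1 (o.getD kv.1 0 + kv.2)) (PySem.Dict.mk d1)).items

def ingredient_mixes_alt (flat_recipes : List (List (List (String × Int)))) : List (List (String × Int)) :=
  -- mixes = list(flat_recipes[-1]); on [] Python raises IndexError (excluded by Pre_)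
  let mixes0 := (PySem.List.pyGet? flat_recipes (-1)).getD []
  ((PySem.List.slice flat_recipes none (some (-1))).reverse).foldl
    (fun mixes level => level.flatMap (fun ing => mixes.map (fun m => pv_merge ing m))) mixes0

-- ===== PRECONDITION & SPEC =====
-- Pre_ excludes (a) the empty list, on which A raises IndexError, and (b) inner assoc lists with
-- duplicate keys, which represent no Python dict (a Python dict literal collapses duplicates
-- before A ever runs), so the List-model's behaviour there is accidental.
def Pre_ingredient_mixes (flat_recipes : List (List (List (String × Int)))) : Prop :=
  flat_recipes ≠ [] ∧
    ∀ level ∈ flat_recipes, ∀ d ∈ level, (d.map Prod.fst).Nodup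
instance (flat_recipes : List (List (List (String × Int)))) : Decidable (Pre_ingredient_mixes flat_recipes) := by unfold Pre_ingredient_mixes; infer_instance

def pvWitness_ingredient_mixes : (List (List (List (String × Int)))) :=
  [[[("a", 1)], [("b", 2)]], [[("a", 3), ("c", 4)]]]

def Spec_ingredient_mixes (flat_recipes : List (List (List (String × Int)))) (out : List (List (String × Int))) : Prop := out = ingredient_mixes_alt flat_recipes
instance (flat_recipes : List (List (List (String × Int)))) (out : List (List (String × Int))) : Decidable (Spec_ingredient_mixes flat_recipes out) := by unfold Spec_ingredient_mixes; infer_instance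

-- ===== CLAIM (what is proved, stated in full; the proofs are below) =====
def Claim_equal_ingredient_mixes : Prop := ∀ (flat_recipes : List (List (List (String × Int)))), Dom_ingredient_mixes flat_recipes → Pre_ingredient_mixes flat_recipes → Spec_ingredient_mixes flat_recipes (ingredient_mixes flat_recipes)

-- ===== LEMMAS AND PROOFS =====

-- Phase 1 of make_grocery_list [d1, d2]: folding d1's pairs into an accumulator that is
-- Dict.mk of the processed prefix rebuilds exactly Dict.mk d1 (keys of d1 are fresh/nodup).
theorem mgl_phase1 (d1 : List (String × Int)) (h1 : (d1.map Prod.fst).Nodup) :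
    ∀ (l p : List (String × Int)), d1 = p ++ l →
      (l.foldl (fun g kv =>
        let ingredient := kv.1
        if g.contains ingredient then
          g.insert ingredient (g.getD ingredient 0 + (PySem.Dict.mk d1).getD ingredient 0)
        else
          g.insert ingredient ((PySem.Dict.mk d1).getD ingredient 0)) (PySem.Dict.mk p))
        = PySem.Dict.mk d1 := by
  intro l
  induction l with
  | nil => intro p hp; simp [hp]
  | cons kv t ih =>
      intro p hp
      obtain ⟨k, v⟩ := kv
      have hnd : (PySem.Dict.mk d1).keys.Nodup := by simpa [PySem.Dict.keys] using h1
      have hmem : (k, v) ∈ (PySem.Dict.mk d1).items := by simp [hp]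
      have hget : (PySem.Dict.mk d1).getD k 0 = v :=
        PySem.Dict.getD_of_mem_items _ hmem hnd 0
      have hknotp : k ∉ p.map Prod.fst := by
        have h1' : ((p ++ (k, v) :: t).map Prod.fst).Nodup := by rw [← hp]; exact h1
        rw [List.map_append] at h1'
        intro hk
        exact (List.nodup_append.mp h1').2.2 k hk k (by simp) rfl
      have hcont : (PySem.Dict.mk p).contains k = false := by
        rw [PySem.Dict.contains_mk, List.any_eq_false]
        intro q hq
        have : q.1 ≠ k := fun h => hknotp (h ▸ List.mem_map_of_mem hq)
        simpa using this
      have hins : (PySem.Dict.mk p).insert k v = PySem.Dict.mk (p ++ [(k, v)]) := by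
        apply PySem.Dict.ext
        rw [PySem.Dict.items_insert_of_not_contains _ v hcont]
      simp only [List.foldl_cons, hcont, Bool.false_eq_true, if_false, hget, hins]
      exact ih (p ++ [(k, v)]) (by simp [hp])

-- make_grocery_list on exactly two nodup-keyed dicts is B's _merge.
theorem mgl_pair (d1 d2 : List (String × Int)) (h1 : (d1.map Prod.fst).Nodup)
    (h2 : (d2.map Prod.fst).Nodup) :
    make_grocery_list [d1, d2] = pv_merge d1 d2 := by
  unfold make_grocery_list pv_merge
  simp only [List.foldl_cons, List.foldl_nil]
  have e1 : (d1.foldl (fun g kv =>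
        let ingredient := kv.1
        if g.contains ingredient then
          g.insert ingredient (g.getD ingredient 0 + (PySem.Dict.mk d1).getD ingredient 0)
        else
          g.insert ingredient ((PySem.Dict.mk d1).getD ingredient 0)) PySem.Dict.empty)
      = PySem.Dict.mk d1 := by
    have := mgl_phase1 d1 h1 d1 [] (by simp)
    simpa [PySem.Dict.empty] using this
  rw [e1]
  congr 1
  apply PySem.List.foldl_congr_mem
  intro g kv hkv
  obtain ⟨k, v⟩ := kv
  have hnd2 : (PySem.Dict.mk d2).keys.Nodup := by simpa [PySem.Dict.keys] using h2
  have hget2 : (PySem.Dict.mk d2).getD k 0 = v :=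
    PySem.Dict.getD_of_mem_items _ (by simpa [PySem.Dict.items] using hkv) hnd2 0
  by_cases hc : g.contains k = true
  · simp [hc, hget2]
  · have hc' : g.contains k = false := by simpa using hc
    simp only [hc', Bool.false_eq_true, if_false, hget2]
    rw [PySem.Dict.getD_of_not_contains g 0 hc', zero_add]

-- B's _merge preserves key-nodupness.
theorem merge_nodup (d1 d2 : List (String × Int)) (h1 : (d1.map Prod.fst).Nodup) :
    ((pv_merge d1 d2).map Prod.fst).Nodup := by
  unfold pv_merge
  have := PySem.Dict.nodup_keys_foldl_insert_key d2 (fun kv : String × Int => kv.1)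
      (fun (o : PySem.Dict String Int) kv => o.getD kv.1 0 + kv.2) (PySem.Dict.mk d1)
      (by simpa [PySem.Dict.keys] using h1)
  simpa [PySem.Dict.keys] using this

-- A's recursion unfolded to flatMap form (rest nonempty).
theorem ingA_cons (level : List (List (String × Int)))
    (rest : List (List (List (String × Int)))) (hr : rest ≠ []) :
    ingredient_mixes (level :: rest)
      = level.flatMap (fun ing =>
          (ingredient_mixes rest).map (fun om => make_grocery_list [ing, om])) := by
  obtain ⟨r, rs, rfl⟩ := List.exists_cons_of_ne_nil hr
  show level.foldl _ [] = _
  rw [PySem.List.foldl_congr_mem level _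
      (fun acc ing => acc ++ (ingredient_mixes (r :: rs)).map (fun om => make_grocery_list [ing, om])) []
      (fun acc ing _ => PySem.List.foldl_append_singleton_eq_map _ _ _),
    PySem.List.foldl_append_eq_flatMap]
  simp

-- B on a singleton list returns the level unchanged.
theorem ingB_single (level : List (List (String × Int))) :
    ingredient_mixes_alt [level] = level := by
  simp [ingredient_mixes_alt, PySem.List.pyGet?, PySem.List.pyIdx?, PySem.List.slice]

-- B's recursion unfolded (rest nonempty): one more pass over the precomputed suffix mixes.
theorem ingB_cons (level : List (List (String × Int)))
    (rest : List (List (List (String × Int)))) (hr : rest ≠ []) :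
    ingredient_mixes_alt (level :: rest)
      = level.flatMap (fun ing =>
          (ingredient_mixes_alt rest).map (fun m => pv_merge ing m)) := by
  obtain ⟨r, rs, rfl⟩ := List.exists_cons_of_ne_nil hr
  unfold ingredient_mixes_alt
  have hget : PySem.List.pyGet? (level :: r :: rs) (-1) = PySem.List.pyGet? (r :: rs) (-1) := by
    simp [PySem.List.pyGet?, PySem.List.pyIdx?]
    rfl
  have hslice : ∀ (xs : List (List (List (String × Int)))), xs ≠ [] →
      PySem.List.slice xs none (some (-1)) = xs.dropLast := by
    intro xs hxs
    simp [PySem.List.slice, PySem.List.clampIdx]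
    rw [if_neg hxs, List.dropLast_eq_take]
    congr 1
    have : xs.length ≠ 0 := by simpa using (List.length_pos_of_ne_nil hxs).ne'
    omega
  rw [hget, hslice _ (by simp), hslice _ (by simp)]
  simp only [List.dropLast_cons_of_ne_nil (by simp : (r :: rs : List _) ≠ []),
    List.reverse_cons, List.foldl_append, List.foldl_cons, List.foldl_nil]

-- Main induction: on Pre_, A = B and every produced dict has nodup keys.
theorem main_ind (flat_recipes : List (List (List (String × Int))))
    (hpre : ∀ level ∈ flat_recipes, ∀ d ∈ level, (d.map Prod.fst).Nodup)
    (hne : flat_recipes ≠ []) :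
    ingredient_mixes flat_recipes = ingredient_mixes_alt flat_recipes ∧
      ∀ d ∈ ingredient_mixes_alt flat_recipes, (d.map Prod.fst).Nodup := by
  induction flat_recipes with
  | nil => exact absurd rfl hne
  | cons level rest ih =>
      rcases eq_or_ne rest [] with hrest | hrest
      · subst hrest
        refine ⟨?_, ?_⟩
        · show level = _
          rw [ingB_single]
        · rw [ingB_single]
          exact hpre level (by simp)
      · have hpre' : ∀ l ∈ rest, ∀ d ∈ l, (d.map Prod.fst).Nodup := by
          intro l hl; exact hpre l (by simp [hl])
        obtain ⟨heq, hnd⟩ := ih hpre' hrest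
        rw [ingA_cons level rest hrest, ingB_cons level rest hrest, heq]
        constructor
        · apply List.flatMap_congr
          intro ing hing
          apply List.map_congr_left
          intro om hom
          exact mgl_pair ing om (hpre level (by simp) ing hing) (hnd om hom)
        · intro d hd
          simp only [List.mem_flatMap, List.mem_map] at hd
          obtain ⟨ing, hing, om, hom, rfl⟩ := hd
          exact merge_nodup ing om (hpre level (by simp) ing hing)

-- ===== VERDICT (by name: the statement is the Claim_ definition above) =====
theorem ingredient_mixes_spec : Claim_equal_ingredient_mixes := by
  intro flat_recipes _ hpre
  exact (main_ind flat_recipes hpre.2 hpre.1).1
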